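-- pv_equiv track=rewrite | github.com/Zek21/ScreenMemory | tools/skynet_api.py | _digest_worker_results
-- ===== SOURCE A (Python) =====
-- def _digest_worker_results(results):
--     """Build per-worker results summary. Returns list of lines."""
--     lines = [f"## Task Results ({len(results)} total)"]
--     if not results:
--         lines.append("  (no results on bus)")
--         return lines
--     by_worker = {}
--     for r in results:
--         by_worker.setdefault(r.get("sender", "unknown"), []).append(r)
--     for worker, worker_results in sorted(by_worker.items()):
--         lines.append(f"\n### {worker.upper()} ({len(worker_results)} results)")
--         for r in worker_results[-5:]:
--             content = r.get("content", "")[:120]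
--             ts = r.get("timestamp", "")
--             if "T" in ts:
--                 ts = ts.split("T")[1][:8]
--             c_lower = content.lower()
--             status = "[OK]" if any(w in c_lower for w in ["fixed", "created", "completed", "ok", "done", "success"]) else "[INFO]"
--             if any(w in c_lower for w in ["failed", "error", "broken"]):
--                 status = "[FAIL]"
--             lines.append(f"  {status} [{ts}] {content}")
--     return lines
-- ===== SOURCE B (Python) =====
-- _FAIL_WORDS = ("failed", "error", "broken")
-- _OK_WORDS = ("fixed", "created", "completed", "ok", "done", "success")
--
--
-- def _status(low):
--     if any(w in low for w in _FAIL_WORDS):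
--         return "[FAIL]"
--     if any(w in low for w in _OK_WORDS):
--         return "[OK]"
--     return "[INFO]"
--
--
-- def _short_ts(ts):
--     return ts.split("T")[1][:8] if "T" in ts else ts
--
--
-- def _line(r):
--     content = r.get("content", "")[:120]
--     return f"  {_status(content.lower())} [{_short_ts(r.get('timestamp', ''))}] {content}"
--
--
-- def _runs(rows, key):
--     """Split a key-sorted list into maximal runs of equal key, recursively."""
--     if not rows:
--         return []
--     k = key(rows[0])
--     i = 1
--     while i < len(rows) and key(rows[i]) == k:
--         i += 1
--     return [(k, rows[:i])] + _runs(rows[i:], key)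
--
--
-- def _digest_worker_results(results):
--     """Build per-worker results summary. Returns list of lines."""
--     if not results:
--         return ["## Task Results (0 total)", "  (no results on bus)"]
--     key = lambda r: r.get("sender", "unknown")
--     return [f"## Task Results ({len(results)} total)"] + [
--         line
--         for worker, group in _runs(sorted(results, key=key), key)
--         for line in [f"\n### {worker.upper()} ({len(group)} results)"]
--                     + [_line(r) for r in group[-5:]]
--     ]
-- ===== Notes on version B (the rewrite author's own statement) =====
-- stated objective: idiomatic
-- what changed: Replaces the by_worker dict grouping plus imperative line-appending loops with one stable sort by sender key, a recursive run-splitter over the sorted list, and a flat list comprehension that maps small formatting helpers (_status/_short_ts/_line) over each run.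
import Mathlib
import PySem

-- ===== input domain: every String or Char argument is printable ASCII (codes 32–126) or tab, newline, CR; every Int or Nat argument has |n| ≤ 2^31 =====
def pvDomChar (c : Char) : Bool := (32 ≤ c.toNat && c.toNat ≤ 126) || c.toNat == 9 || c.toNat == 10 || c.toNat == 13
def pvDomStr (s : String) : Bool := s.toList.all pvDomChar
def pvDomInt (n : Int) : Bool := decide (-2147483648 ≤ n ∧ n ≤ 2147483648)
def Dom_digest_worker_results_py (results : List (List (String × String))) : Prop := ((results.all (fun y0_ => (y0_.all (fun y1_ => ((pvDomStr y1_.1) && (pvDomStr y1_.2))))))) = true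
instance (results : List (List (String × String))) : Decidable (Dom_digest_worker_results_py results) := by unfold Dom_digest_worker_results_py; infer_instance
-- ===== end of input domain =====

-- B replaces A's by_worker dict (group into a dict, sort its items, append lines
-- imperatively) with one stable sort by sender key, a recursive run-splitter and a
-- flat list comprehension that maps small formatting helpers over each run (idiomatic).

-- shared helper: both Pythons contain the identical r.get(...) lookup.
-- r.get(k, d): association-list dict, first-match lookup
def pvGet (r : List (String × String)) (k d : String) : String :=
  (List.lookup k r).getD d

-- r.get("sender", "unknown")
def pvKey (r : List (String × String)) : String :=
  pvGet r "sender" "unknown"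

-- ===== PORT A =====
-- A's per-result line: content[:120], timestamp split at "T", then the OK/INFO
-- keyword scan with the FAIL scan overriding it
def pvFmt (r : List (String × String)) : String :=
  let content := PySem.Str.slice (pvGet r "content" "") none (some 120)
  let ts0 := pvGet r "timestamp" ""
  -- ts.split("T")[1][:8]: when "T" in ts the split has ≥ 2 pieces, so the getD defaults never fire (exact)
  let ts := if PySem.Str.isIn "T" ts0 then
      PySem.Str.slice (((PySem.Str.split? ts0 "T").getD []).getD 1 "") none (some 8)
    else ts0
  let c_lower := PySem.Str.lower content
  let status := if ["fixed", "created", "completed", "ok", "done", "success"].any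
      (fun w => PySem.Str.isIn w c_lower) then "[OK]" else "[INFO]"
  let status := if ["failed", "error", "broken"].any (fun w => PySem.Str.isIn w c_lower)
    then "[FAIL]" else status
  "  " ++ status ++ " [" ++ ts ++ "] " ++ content

def digest_worker_results_py (results : List (List (String × String))) : List String :=
  let lines := ["## Task Results (" ++ PySem.Int.toStr (results.length : Int) ++ " total)"]
  if results.isEmpty then lines ++ ["  (no results on bus)"]
  else
    -- by_worker.setdefault(r.get("sender","unknown"), []).append(r)
    let by_worker : PySem.Dict String (List (List (String × String))) :=
      results.foldl (fun d r => d.modify (pvKey r) [] (· ++ [r])) PySem.Dict.empty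
    -- sorted(by_worker.items()): dict keys are unique, so Python's tuple comparison here
    -- never reaches the second component and is exactly the order on the key (exact)
    (PySem.List.sorted by_worker.items (fun p => p.1)).foldl
      (fun lines p =>
        (PySem.List.slice p.2 (some (-5)) none).foldl (fun lines r => lines ++ [pvFmt r])
          (lines ++ ["\n### " ++ PySem.Str.upper p.1 ++ " (" ++
            PySem.Int.toStr (p.2.length : Int) ++ " results)"]))
      lines

-- ===== PORT B =====
-- _status(low): FAIL / OK / INFO early-return chain
def pvStatus (low : String) : String :=
  if ["failed", "error", "broken"].any (fun w => PySem.Str.isIn w low) then "[FAIL]"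
  else if ["fixed", "created", "completed", "ok", "done", "success"].any
    (fun w => PySem.Str.isIn w low) then "[OK]"
  else "[INFO]"

-- _short_ts(ts): ts.split("T")[1][:8] if "T" in ts else ts
-- (when "T" in ts the split has ≥ 2 pieces, so the getD defaults never fire: exact)
def pvShortTs (ts : String) : String :=
  if PySem.Str.isIn "T" ts then
    PySem.Str.slice (((PySem.Str.split? ts "T").getD []).getD 1 "") none (some 8)
  else ts

-- _line(r)
def pvLine (r : List (String × String)) : String :=
  let content := PySem.Str.slice (pvGet r "content" "") none (some 120)
  "  " ++ pvStatus (PySem.Str.lower content) ++ " [" ++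
    pvShortTs (pvGet r "timestamp" "") ++ "] " ++ content

-- _runs(rows, key): split the key-sorted list into maximal runs of equal key
def pvRuns : List (List (String × String)) → List (String × List (List (String × String)))
  | [] => []
  | x :: xs =>
    (pvKey x, x :: xs.takeWhile (fun y => pvKey y == pvKey x)) ::
      pvRuns (xs.dropWhile (fun y => pvKey y == pvKey x))
  termination_by rows => rows.length
  decreasing_by
    have := List.length_dropWhile_le (fun y => pvKey y == pvKey x) xs
    simp; omega

def digest_worker_results_py_alt (results : List (List (String × String))) : List String :=
  if results.isEmpty then ["## Task Results (0 total)", "  (no results on bus)"]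
  else
    ("## Task Results (" ++ PySem.Int.toStr (results.length : Int) ++ " total)") ::
      (pvRuns (PySem.List.sorted results pvKey)).flatMap
        (fun p =>
          ("\n### " ++ PySem.Str.upper p.1 ++ " (" ++
              PySem.Int.toStr (p.2.length : Int) ++ " results)") ::
            (PySem.List.slice p.2 (some (-5)) none).map pvLine)

-- ===== PRECONDITION & SPEC =====
def Spec_digest_worker_results_py (results : List (List (String × String))) (out : List String) : Prop := out = digest_worker_results_py_alt results
instance (results : List (List (String × String))) (out : List String) : Decidable (Spec_digest_worker_results_py results out) := by unfold Spec_digest_worker_results_py; infer_instance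

-- ===== CLAIM (what is proved, stated in full; the proofs are below) =====
def Claim_equal_digest_worker_results_py : Prop := ∀ (results : List (List (String × String))), Dom_digest_worker_results_py results → Spec_digest_worker_results_py results (digest_worker_results_py results)

-- ===== LEMMAS AND PROOFS =====

def pvGrp (rs : List (List (String × String))) (k : String) : List (List (String × String)) :=
  rs.filter (fun r => pvKey r == k)


theorem pv_filter_insertBy (x : List (String × String)) (l : List (List (String × String)))
    (k : String) (h : l.Pairwise (fun a b => pvKey a ≤ pvKey b)) :
    (PySem.List.insertBy (fun a b => decide (pvKey a < pvKey b)) x l).filter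
        (fun r => pvKey r == k)
      = l.filter (fun r => pvKey r == k) ++ (if pvKey x == k then [x] else []) := by
  induction l with
  | nil => simp [PySem.List.insertBy, List.filter]; split <;> simp_all
  | cons y ys ih =>
    rw [List.pairwise_cons] at h
    obtain ⟨hy, hys⟩ := h
    by_cases hlt : pvKey x < pvKey y
    · simp only [PySem.List.insertBy, hlt, decide_true, if_true]
      by_cases hk : pvKey x == k
      · have hkx : pvKey x = k := by simpa using hk
        have hnil : (y :: ys).filter (fun r => pvKey r == k) = [] := by
          apply List.filter_eq_nil_iff.mpr
          intro z hz
          have : pvKey x < pvKey z := by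
            rcases List.mem_cons.mp hz with rfl | hz
            · exact hlt
            · exact lt_of_lt_of_le hlt (hy z hz)
          simp [← hkx]
          exact fun e => absurd e (ne_of_gt this)
        rw [List.filter_cons]
        simp [hnil, hkx]
      · simp [List.filter_cons, hk]
    · simp only [PySem.List.insertBy, hlt, decide_false, if_false, Bool.false_eq_true]
      rw [List.filter_cons, List.filter_cons, ih hys]
      by_cases hyk : pvKey y == k <;> simp [hyk]


theorem pv_sorted_filter (rs : List (List (String × String))) (k : String) :
    (PySem.List.sorted rs pvKey).filter (fun r => pvKey r == k) = pvGrp rs k := by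
  induction rs using List.reverseRecOn with
  | nil => simp [PySem.List.sorted, pvGrp]
  | append_singleton xs x ih =>
    rw [PySem.List.sorted_eq_foldl_insertBy, List.foldl_append, List.foldl_cons, List.foldl_nil,
      ← PySem.List.sorted_eq_foldl_insertBy]
    rw [pv_filter_insertBy x _ k (PySem.List.sorted_pairwise xs pvKey), ih]
    unfold pvGrp
    rw [List.filter_append]
    by_cases hk : pvKey x == k <;> simp [hk]

theorem pv_dict_items (rs : List (List (String × String))) :
    (rs.foldl (fun d r => d.modify (pvKey r) [] (· ++ [r]))
        (PySem.Dict.empty : PySem.Dict String (List (List (String × String))))).items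
      = (PySem.List.dedup (rs.map pvKey)).map (fun k => (k, pvGrp rs k)) := by
  induction rs using List.reverseRecOn with
  | nil => simp [PySem.Dict.empty, PySem.List.dedup, PySem.Set.ofList, PySem.Set.empty]
  | append_singleton xs x ih =>
    rw [List.foldl_append, List.foldl_cons, List.foldl_nil]
    rw [List.map_append, List.map_cons, List.map_nil]
    have hded : PySem.List.dedup (xs.map pvKey ++ [pvKey x])
        = PySem.Set.add (PySem.List.dedup (xs.map pvKey)) (pvKey x) := by
      simp [PySem.List.dedup, PySem.Set.ofList, List.foldl_append]
    set ks := PySem.List.dedup (xs.map pvKey) with hks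
    set D := xs.foldl (fun d r => d.modify (pvKey r) [] (· ++ [r]))
        (PySem.Dict.empty : PySem.Dict String (List (List (String × String)))) with hD
    have hgrp : ∀ k, pvGrp (xs ++ [x]) k = pvGrp xs k ++ (if pvKey x == k then [x] else []) := by
      intro k
      unfold pvGrp
      rw [List.filter_append]
      by_cases hk : pvKey x == k <;> simp [hk]
    have hcont : D.contains (pvKey x) = true ↔ pvKey x ∈ ks := by
      rw [PySem.Dict.contains, ih, List.any_map]
      simp only [Function.comp, List.any_eq_true, beq_iff_eq]
      exact ⟨fun ⟨a, ha, e⟩ => e ▸ ha, fun h' => ⟨pvKey x, h', rfl⟩⟩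
    have hget : D.getD (pvKey x) [] = if pvKey x ∈ ks then pvGrp xs (pvKey x) else [] := by
      simp [PySem.Dict.getD, PySem.Dict.get?, ih]
      induction ks with
      | nil => simp
      | cons a as ihk =>
        by_cases ha : a == pvKey x
        · have : a = pvKey x := by simpa using ha
          simp [List.find?, this]
        · have : ¬ (pvKey x = a) := by simp at ha; exact fun e => ha e.symm
          simp [List.find?, ha, this, ihk]
    by_cases hmem : pvKey x ∈ ks
    · have hcontT : D.contains (pvKey x) = true := by
        rw [hcont]; simp [hmem]
      have haddeq : PySem.Set.add ks (pvKey x) = ks := by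
        simp [PySem.Set.add, PySem.Set.contains, hmem]
      rw [hded, haddeq]
      simp only [PySem.Dict.modify, PySem.Dict.insert, hcontT, if_true]
      rw [ih, List.map_map]
      apply List.map_congr_left
      intro a _
      by_cases hax : a == pvKey x
      · have hax' : a = pvKey x := by simpa using hax
        simp [Function.comp, hgrp, hax', hget, hmem]
      · have hax' : ¬ (pvKey x == a) := by simp at hax ⊢; exact fun e => hax e.symm
        simp [Function.comp, hax, hgrp, hax']
    · have hcontF : D.contains (pvKey x) = false := by
        cases h' : D.contains (pvKey x)
        · rfl
        · exact absurd (hcont.mp h') hmem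
      have haddeq : PySem.Set.add ks (pvKey x) = ks ++ [pvKey x] := by
        simp [PySem.Set.add, PySem.Set.contains, hmem]
      rw [hded, haddeq]
      simp only [PySem.Dict.modify, PySem.Dict.insert, hcontF, Bool.false_eq_true, if_false]
      rw [ih, List.map_append, List.map_cons, List.map_nil]
      congr 1
      · apply List.map_congr_left
        intro a ha
        have hax : ¬ (pvKey x == a) := by
          simp; exact fun e => hmem (e ▸ ha)
        simp [hgrp, hax]
      · have hg : pvGrp xs (pvKey x) = [] := by
          apply List.filter_eq_nil_iff.mpr
          intro z hz hzk
          exact hmem (by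
            rw [hks, PySem.List.mem_dedup]
            exact List.mem_map.mpr ⟨z, hz, by simpa using hzk⟩)
        simp [hget, hmem, hgrp, hg]

theorem pv_dropWhile_lt (x : List (String × String)) (xs : List (List (String × String)))
    (h : (x :: xs).Pairwise (fun a b => pvKey a ≤ pvKey b)) :
    ∀ z ∈ xs.dropWhile (fun y => pvKey y == pvKey x), pvKey x < pvKey z := by
  induction xs with
  | nil => simp
  | cons y ys ih =>
    rw [List.pairwise_cons] at h
    obtain ⟨hx, hys⟩ := h
    by_cases hy : pvKey y == pvKey x
    · rw [List.dropWhile_cons, if_pos hy]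
      apply ih
      rw [List.pairwise_cons]
      rw [List.pairwise_cons] at hys
      exact ⟨fun z hz => hx z (List.mem_cons_of_mem _ hz), hys.2⟩
    · rw [List.dropWhile_cons, if_neg hy]
      intro z hz
      have hxy : pvKey x < pvKey y :=
        lt_of_le_of_ne (hx y (List.mem_cons_self)) (fun e => hy (by simp [e]))
      rcases List.mem_cons.mp hz with rfl | hz
      · exact hxy
      · rw [List.pairwise_cons] at hys
        exact lt_of_lt_of_le hxy (hys.1 z hz)

theorem pv_takeWhile_filter (x : List (String × String)) (xs : List (List (String × String)))
    (h : (x :: xs).Pairwise (fun a b => pvKey a ≤ pvKey b)) :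
    x :: xs.takeWhile (fun y => pvKey y == pvKey x)
      = (x :: xs).filter (fun y => pvKey y == pvKey x) := by
  rw [List.filter_cons_of_pos (by simp)]
  congr 1
  conv_rhs => rw [← List.takeWhile_append_dropWhile (p := fun y => pvKey y == pvKey x) (l := xs)]
  rw [List.filter_append]
  rw [List.filter_eq_self.mpr (fun a ha => List.mem_takeWhile_imp (l := xs) (p := fun y => pvKey y == pvKey x) ha)]
  rw [List.filter_eq_nil_iff.mpr (fun z hz => by
    have := pv_dropWhile_lt x xs h z hz
    simp
    exact (ne_of_lt this).symm), List.append_nil]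

theorem pv_runs_head (m : List (List (String × String))) :
    ∀ p ∈ pvRuns m, p.1 ∈ m.map pvKey := by
  induction m using pvRuns.induct with
  | case1 => simp [pvRuns]
  | case2 x xs ih =>
    intro p hp
    rw [pvRuns] at hp
    rcases List.mem_cons.mp hp with rfl | hp
    · simp
    · have := ih p hp
      rcases List.mem_map.mp this with ⟨z, hz, he⟩
      exact List.mem_map.mpr ⟨z, List.mem_cons_of_mem _ ((List.dropWhile_sublist _).subset hz), he⟩

theorem pv_runs_mem (m : List (List (String × String))) (k : String) :
    k ∈ (pvRuns m).map Prod.fst ↔ k ∈ m.map pvKey := by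
  induction m using pvRuns.induct with
  | case1 => simp [pvRuns]
  | case2 x xs ih =>
    constructor
    · intro hk
      rcases List.mem_map.mp hk with ⟨p, hp, he⟩
      exact he ▸ pv_runs_head _ p hp
    · intro hk
      rw [pvRuns]
      rcases List.mem_map.mp hk with ⟨z, hz, he⟩
      rcases List.mem_cons.mp hz with rfl | hz
      · exact List.mem_map.mpr ⟨_, List.mem_cons_self, he⟩
      · by_cases hzx : k = pvKey x
        · exact List.mem_map.mpr ⟨_, List.mem_cons_self, hzx.symm⟩
        · rw [List.map_cons]
          apply List.mem_cons_of_mem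
          apply ih.mpr
          apply List.mem_map.mpr
          refine ⟨z, ?_, he⟩
          have hzdrop : z ∉ xs.takeWhile (fun y => pvKey y == pvKey x) := by
            intro hzt
            have := List.mem_takeWhile_imp hzt
            exact hzx (by simp at this; rw [he] at this; exact this)
          have := List.takeWhile_append_dropWhile (p := fun y => pvKey y == pvKey x) (l := xs)
          rw [← this] at hz
          rcases List.mem_append.mp hz with h1 | h1
          · exact absurd h1 hzdrop
          · exact h1

theorem pv_runs_pairwise (m : List (List (String × String)))
    (h : m.Pairwise (fun a b => pvKey a ≤ pvKey b)) :
    (pvRuns m).Pairwise (fun p q => p.1 < q.1) := by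
  induction m using pvRuns.induct with
  | case1 => simp [pvRuns]
  | case2 x xs ih =>
    rw [pvRuns, List.pairwise_cons]
    have hdrop : (xs.dropWhile (fun y => pvKey y == pvKey x)).Pairwise
        (fun a b => pvKey a ≤ pvKey b) :=
      ((List.pairwise_cons.mp h).2.sublist (List.dropWhile_sublist _))
    refine ⟨?_, ih hdrop⟩
    intro q hq
    rcases List.mem_map.mp (pv_runs_head _ q hq) with ⟨z, hz, he⟩
    exact he ▸ pv_dropWhile_lt x xs h z hz

theorem pv_runs_eq (m : List (List (String × String)))
    (h : m.Pairwise (fun a b => pvKey a ≤ pvKey b)) :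
    pvRuns m = (pvRuns m).map (fun p => (p.1, m.filter (fun y => pvKey y == p.1))) := by
  induction m using pvRuns.induct with
  | case1 => simp [pvRuns]
  | case2 x xs ih =>
    rw [pvRuns, List.map_cons]
    congr 1
    · simp only
      rw [pv_takeWhile_filter x xs h]
    · have hdrop : (xs.dropWhile (fun y => pvKey y == pvKey x)).Pairwise
          (fun a b => pvKey a ≤ pvKey b) :=
        ((List.pairwise_cons.mp h).2.sublist (List.dropWhile_sublist _))
      conv_lhs => rw [ih hdrop]
      apply List.map_congr_left
      intro p hp
      congr 1
      -- filter over the whole list = filter over the tail beyond the first run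
      have hk : pvKey x < p.1 := by
        rcases List.mem_map.mp (pv_runs_head _ p hp) with ⟨z, hz, he⟩
        exact he ▸ pv_dropWhile_lt x xs h z hz
      have hfilter : ∀ w ∈ x :: xs.takeWhile (fun y => pvKey y == pvKey x),
          ¬ (pvKey w == p.1) := by
        intro w hw
        rcases List.mem_cons.mp hw with rfl | hw
        · simp; exact ne_of_lt hk
        · have := List.mem_takeWhile_imp hw
          simp at this ⊢
          rw [this]; exact ne_of_lt hk
      have hnil : (x :: xs.takeWhile (fun y => pvKey y == pvKey x)).filter
          (fun y => pvKey y == p.1) = [] :=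
        List.filter_eq_nil_iff.mpr (fun w hw => by simpa using hfilter w hw)
      conv_rhs => rw [← List.takeWhile_append_dropWhile (p := fun y => pvKey y == pvKey x) (l := xs),
        show (x :: (xs.takeWhile (fun y => pvKey y == pvKey x) ++ xs.dropWhile (fun y => pvKey y == pvKey x))) = (x :: xs.takeWhile (fun y => pvKey y == pvKey x)) ++ xs.dropWhile (fun y => pvKey y == pvKey x) from rfl,
        List.filter_append, hnil, List.nil_append]

-- the two per-line formatters agree: FAIL-overrides-OK equals the FAIL/OK/INFO chain
theorem pv_line_eq (r : List (String × String)) : pvLine r = pvFmt r := by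
  unfold pvFmt pvLine pvStatus pvShortTs
  by_cases hf : ["failed", "error", "broken"].any
      (fun w => PySem.Str.isIn w (PySem.Str.lower (PySem.Str.slice (pvGet r "content" "") none (some 120)))) <;>
    by_cases ho : ["fixed", "created", "completed", "ok", "done", "success"].any
      (fun w => PySem.Str.isIn w (PySem.Str.lower (PySem.Str.slice (pvGet r "content" "") none (some 120)))) <;>
  simp_all

theorem pv_main (rs : List (List (String × String))) :
    PySem.List.sorted
        (rs.foldl (fun d r => d.modify (pvKey r) [] (· ++ [r]))
          (PySem.Dict.empty : PySem.Dict String (List (List (String × String))))).items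
        (fun p => p.1)
      = pvRuns (PySem.List.sorted rs pvKey) := by
  set l := PySem.List.sorted rs pvKey with hl
  have hp : l.Pairwise (fun a b => pvKey a ≤ pvKey b) := PySem.List.sorted_pairwise rs pvKey
  have hpr : (pvRuns l).Pairwise (fun p q => p.1 < q.1) := pv_runs_pairwise l hp
  have hruns : pvRuns l = ((pvRuns l).map Prod.fst).map (fun k => (k, pvGrp rs k)) := by
    rw [List.map_map]
    conv_lhs => rw [pv_runs_eq l hp]
    apply List.map_congr_left
    intro p _
    simp only [Function.comp]
    rw [hl, pv_sorted_filter rs p.1]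
  have hitems := pv_dict_items rs
  have hperm : ((pvRuns l).map Prod.fst).Perm (PySem.List.dedup (rs.map pvKey)) := by
    rw [List.perm_ext_iff_of_nodup]
    · intro k
      rw [pv_runs_mem l k, PySem.List.mem_dedup]
      exact ((((PySem.List.sorted_perm rs pvKey false)).map pvKey).mem_iff (a := k))
    · exact ((List.pairwise_map.mpr hpr).imp (fun h => ne_of_lt h))
    · exact PySem.List.nodup_dedup _
  apply PySem.List.sorted_eq_of_perm_of_pairwise_lt
  · rw [hitems, hruns]
    exact hperm.map _
  · exact hpr

-- ===== VERDICT (by name: the statement is the Claim_ definition above) =====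
theorem digest_worker_results_py_spec : Claim_equal_digest_worker_results_py := by
  intro results _
  unfold Spec_digest_worker_results_py digest_worker_results_py digest_worker_results_py_alt
  by_cases h : results.isEmpty
  · have h0 : results = [] := List.isEmpty_iff.mp h
    simp only [h0, List.isEmpty_nil, if_true, List.length_nil]
    decide
  · simp only [h, if_false, Bool.false_eq_true]
    rw [pv_main]
    -- A's nested appending folds equal B's flat comprehension
    have hfold : ∀ (runs : List (String × List (List (String × String)))) (acc : List String),
        runs.foldl
          (fun lines p =>
            (PySem.List.slice p.2 (some (-5)) none).foldl (fun lines r => lines ++ [pvFmt r])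
              (lines ++ ["\n### " ++ PySem.Str.upper p.1 ++ " (" ++
                PySem.Int.toStr (p.2.length : Int) ++ " results)"]))
          acc
        = acc ++ runs.flatMap
            (fun p => ("\n### " ++ PySem.Str.upper p.1 ++ " (" ++
                PySem.Int.toStr (p.2.length : Int) ++ " results)") ::
              (PySem.List.slice p.2 (some (-5)) none).map pvLine) := by
      intro runs
      induction runs with
      | nil => intro acc; simp
      | cons q qs ih =>
        intro acc
        rw [List.foldl_cons, ih, PySem.List.foldl_append_singleton_eq_map,
          List.flatMap_cons]
        simp [funext pv_line_eq]
    rw [hfold]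
    simp
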